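-- pv_equiv track=rewrite | github.com/muhsinh/vbn-analysis | scripts/analysis/_per_session_pipeline.py | _canonicalize_area
-- ===== SOURCE A (Python) =====
-- def _canonicalize_area(a: str) -> str:
--     """Collapse subregion labels (e.g. LGd-sh, LGd-co → LGd; DG-mo → DG)."""
--     if not isinstance(a, str):
--         return str(a)
--     for prefix in ["LGd", "DG", "SCig", "SCiw", "VISp", "VISl", "VISam", "VISpm",
--                     "VISal", "VISrl", "MGd", "MGv", "MGm", "MRN", "CA1", "CA3", "ProS",
--                     "POST", "SUB", "MB"]:
--         if a == prefix:
--             return prefix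
--         if a.startswith(prefix + "-") or a.startswith(prefix + "l") or a.startswith(prefix + "o"):
--             return prefix
--     return a
-- ===== SOURCE B (Python) =====
-- _PSET = frozenset(["LGd", "DG", "SCig", "SCiw", "VISp", "VISl", "VISam", "VISpm",
--                    "VISal", "VISrl", "MGd", "MGv", "MGm", "MRN", "CA1", "CA3", "ProS",
--                    "POST", "SUB", "MB"])
--
--
-- def _canonicalize_area(a: str) -> str:
--     """Collapse subregion labels (e.g. LGd-sh, LGd-co → LGd; DG-mo → DG)."""
--     if not isinstance(a, str):
--         return str(a)
--     # Exact canonical label.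
--     if a in _PSET:
--         return a
--     # Otherwise scan the cut positions of `a` itself (canonical labels are
--     # 2..5 chars): a stem a[:k] is the answer iff it is a canonical label and
--     # the separator character right after it is '-', 'l' or 'o'.
--     for k in range(2, min(len(a), 6)):
--         if a[k] in "-lo" and a[:k] in _PSET:
--             return a[:k]
--     return a
-- ===== Notes on version B (the rewrite author's own statement) =====
-- stated objective: alternative
-- what changed: B inverts the search direction: instead of A's linear scan over the 20-prefix list with four string tests each, B first checks the input itself for exact membership in a frozenset of canonical labels and then iterates over the input's own cut positions k=2..5, returning the stem a[:k] when the character right after it is one of the three separator characters and the stem is in the set; this is correct because no canonical label is a strict prefix of another followed by a separator character, so the match is unique.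
import Mathlib
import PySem

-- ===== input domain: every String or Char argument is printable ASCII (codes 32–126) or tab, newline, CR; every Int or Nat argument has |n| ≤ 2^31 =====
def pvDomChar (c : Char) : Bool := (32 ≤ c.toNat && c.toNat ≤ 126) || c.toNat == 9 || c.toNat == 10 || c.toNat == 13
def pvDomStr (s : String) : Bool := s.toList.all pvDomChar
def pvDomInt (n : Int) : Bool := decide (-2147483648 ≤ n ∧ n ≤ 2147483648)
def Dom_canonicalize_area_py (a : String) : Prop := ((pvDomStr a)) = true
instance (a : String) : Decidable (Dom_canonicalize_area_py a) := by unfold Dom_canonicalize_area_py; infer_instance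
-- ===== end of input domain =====

-- B inverts A's search: instead of scanning the 20-prefix list, it checks the input for an exact
-- canonical label and then scans the input's own cut positions k = 2..5, testing the separator
-- character a[k] and set membership of the stem a[:k]; same result, proved equal.
-- (Python's isinstance guard is vacuous under the String type convention and is not ported.)

-- ===== PORT A =====
def pvALoop (a : String) : List String → String
  | [] => a
  | p :: ps =>
    if a == p then p
    else if PySem.Str.startswith a (p ++ "-") || PySem.Str.startswith a (p ++ "l")
            || PySem.Str.startswith a (p ++ "o") then p
    else pvALoop a ps

def canonicalize_area_py (a : String) : String :=
  pvALoop a ["LGd", "DG", "SCig", "SCiw", "VISp", "VISl", "VISam", "VISpm",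
             "VISal", "VISrl", "MGd", "MGv", "MGm", "MRN", "CA1", "CA3", "ProS",
             "POST", "SUB", "MB"]

-- ===== PORT B =====
-- module-level _PSET = frozenset([...])
def pvPSet : PySem.Set String :=
  PySem.Set.ofList ["LGd", "DG", "SCig", "SCiw", "VISp", "VISl", "VISam", "VISpm",
                    "VISal", "VISrl", "MGd", "MGv", "MGm", "MRN", "CA1", "CA3", "ProS",
                    "POST", "SUB", "MB"]

-- for k in range(2, min(len(a), 6)): if a[k] in "-lo" and a[:k] in _PSET: return a[:k]
-- (a[k] is one character, so the "in" is exactly char-at-k ∈ ['-','l','o'])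
def pvBScan (a : String) : List Int → String
  | [] => a
  | k :: ks =>
    if ((PySem.Str.pyGet? a k).any fun c => c == '-' || c == 'l' || c == 'o')
        && PySem.Set.contains pvPSet (PySem.Str.slice a (some 0) (some k))
    then PySem.Str.slice a (some 0) (some k)
    else pvBScan a ks

def canonicalize_area_py_alt (a : String) : String :=
  if PySem.Set.contains pvPSet a then a
  else pvBScan a (PySem.List.pyRange 2 (min (PySem.Str.len a) 6) 1)

-- ===== PRECONDITION & SPEC =====
def Spec_canonicalize_area_py (a : String) (out : String) : Prop := out = canonicalize_area_py_alt a
instance (a : String) (out : String) : Decidable (Spec_canonicalize_area_py a out) := by unfold Spec_canonicalize_area_py; infer_instance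

-- ===== CLAIM (what is proved, stated in full; the proofs are below) =====
def Claim_equal_canonicalize_area_py : Prop := ∀ (a : String), Dom_canonicalize_area_py a → Spec_canonicalize_area_py a (canonicalize_area_py a)

-- ===== LEMMAS AND PROOFS =====

def pvPrefixes : List String :=
  ["LGd", "DG", "SCig", "SCiw", "VISp", "VISl", "VISam", "VISpm",
   "VISal", "VISrl", "MGd", "MGv", "MGm", "MRN", "CA1", "CA3", "ProS",
   "POST", "SUB", "MB"]

-- A's per-prefix test, merged into one boolean
def pvATest (a p : String) : Bool :=
  a == p || PySem.Str.startswith a (p ++ "-") || PySem.Str.startswith a (p ++ "l")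
    || PySem.Str.startswith a (p ++ "o")

-- the "p matches a" predicate both programs decide
def pvMatch (a p : String) : Prop :=
  p.toList <+: a.toList ∧ (a.toList.length = p.toList.length
    ∨ a.toList[p.toList.length]? = some '-' ∨ a.toList[p.toList.length]? = some 'l'
    ∨ a.toList[p.toList.length]? = some 'o')

lemma pvALoop_cons (a p : String) (ps : List String) :
    pvALoop a (p :: ps) = if pvATest a p then p else pvALoop a ps := by
  by_cases h1 : a == p
  · simp [pvALoop, pvATest, h1]
  · by_cases h2 : (PySem.Str.startswith a (p ++ "-") || PySem.Str.startswith a (p ++ "l")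
        || PySem.Str.startswith a (p ++ "o")) <;>
      simp_all [pvALoop, pvATest]

lemma key_lemma (s q : List Char) :
    (s = q ∨ (q ++ ['-']) <+: s ∨ (q ++ ['l']) <+: s ∨ (q ++ ['o']) <+: s)
    ↔ (q <+: s ∧ (s.length = q.length ∨ s[q.length]? = some '-' ∨ s[q.length]? = some 'l'
        ∨ s[q.length]? = some 'o')) := by
  constructor
  · rintro (rfl | ⟨t, rfl⟩ | ⟨t, rfl⟩ | ⟨t, rfl⟩)
    · exact ⟨List.prefix_refl _, Or.inl rfl⟩
    · exact ⟨⟨'-' :: t, by simp⟩, Or.inr (Or.inl (by simp))⟩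
    · exact ⟨⟨'l' :: t, by simp⟩, Or.inr (Or.inr (Or.inl (by simp)))⟩
    · exact ⟨⟨'o' :: t, by simp⟩, Or.inr (Or.inr (Or.inr (by simp)))⟩
  · rintro ⟨⟨t, rfl⟩, h⟩
    cases t with
    | nil => left; simp
    | cons c t' =>
      have hg : (q ++ c :: t')[q.length]? = some c := by simp
      rcases h with h | h | h | h
      · simp at h
      · rw [hg] at h; obtain rfl := Option.some.inj h
        exact Or.inr (Or.inl ⟨t', by simp⟩)
      · rw [hg] at h; obtain rfl := Option.some.inj h
        exact Or.inr (Or.inr (Or.inl ⟨t', by simp⟩))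
      · rw [hg] at h; obtain rfl := Option.some.inj h
        exact Or.inr (Or.inr (Or.inr ⟨t', by simp⟩))

lemma pvATest_iff (a p : String) : pvATest a p = true ↔ pvMatch a p := by
  have d1 : ("-" : String).toList = ['-'] := rfl
  have d2 : ("l" : String).toList = ['l'] := rfl
  have d3 : ("o" : String).toList = ['o'] := rfl
  rw [pvATest, pvMatch, ← key_lemma]
  simp only [Bool.or_eq_true, beq_iff_eq, PySem.Str.startswith_eq,
    PySem.Chars.startswith_iff, String.toList_append, d1, d2, d3, ← String.toList_inj]
  tauto

-- no two distinct canonical labels can match the same input: no label is a strict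
-- prefix of another with '-','l','o' as the following character
lemma pv_pairs : ∀ p1 ∈ pvPrefixes, ∀ p2 ∈ pvPrefixes,
    p1.toList.length < p2.toList.length →
    ¬(p1.toList <+: p2.toList ∧ (p2.toList[p1.toList.length]? = some '-'
      ∨ p2.toList[p1.toList.length]? = some 'l' ∨ p2.toList[p1.toList.length]? = some 'o')) := by
  decide

lemma pv_lens : ∀ p ∈ pvPrefixes, 2 ≤ p.toList.length ∧ p.toList.length ≤ 5 := by decide

lemma pv_match_len (a p : String) (h : pvMatch a p) : p.toList.length ≤ a.toList.length :=
  h.1.length_le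

lemma pv_unique (a : String) : ∀ p1 ∈ pvPrefixes, ∀ p2 ∈ pvPrefixes,
    pvMatch a p1 → pvMatch a p2 → p1 = p2 := by
  have main : ∀ p1 ∈ pvPrefixes, ∀ p2 ∈ pvPrefixes,
      p1.toList.length < p2.toList.length → pvMatch a p1 → pvMatch a p2 → False := by
    intro p1 h1 p2 h2 hlt m1 m2
    have hp12 : p1.toList <+: p2.toList :=
      List.prefix_of_prefix_length_le m1.1 m2.1 (le_of_lt hlt)
    have hlen2 : p2.toList.length ≤ a.toList.length := pv_match_len a p2 m2
    have hidx : a.toList[p1.toList.length]? = p2.toList[p1.toList.length]? := by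
      obtain ⟨t, ht⟩ := m2.1
      rw [← ht, List.getElem?_append_left hlt]
    rcases m1.2 with h | h | h | h
    · omega
    all_goals
      exact pv_pairs p1 h1 p2 h2 hlt ⟨hp12, by rw [← hidx]; tauto⟩
  intro p1 h1 p2 h2 m1 m2
  rcases lt_trichotomy p1.toList.length p2.toList.length with h | h | h
  · exact absurd m1 (fun m1 => main p1 h1 p2 h2 h m1 m2)
  · exact String.toList_inj.mp (List.prefix_of_prefix_length_le m1.1 m2.1 (le_of_eq h)
      |>.eq_of_length h)
  · exact absurd m2 (fun m2 => main p2 h2 p1 h1 h m2 m1)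

lemma pv_match_self (p : String) : pvMatch p p := ⟨List.prefix_refl _, Or.inl rfl⟩

lemma pv_contains_iff (a : String) : PySem.Set.contains pvPSet a = true ↔ a ∈ pvPrefixes := by
  rw [PySem.Set.contains_iff, pvPSet, PySem.Set.mem_ofList]
  rfl

-- the stem a[:k] for a natural cut 0 ≤ k
lemma pv_slice_toList (a : String) (m : Nat) :
    (PySem.Str.slice a (some 0) (some (m : Int))).toList = a.toList.take m := by
  rw [PySem.Str.toList_slice, PySem.Chars.slice_eq_listSlice]
  simp [PySem.List.slice_to]

-- B's per-cut test at k = (m : Int), m < len a, decides "the stem of length m matches and is canonical"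
lemma pv_test_iff (a : String) (m : Nat) (hm : m < a.toList.length) :
    ((((PySem.Str.pyGet? a (m : Int)).any fun c => c == '-' || c == 'l' || c == 'o')
        && PySem.Set.contains pvPSet (PySem.Str.slice a (some 0) (some (m : Int)))) = true)
    ↔ (PySem.Str.slice a (some 0) (some (m : Int))) ∈ pvPrefixes
        ∧ pvMatch a (PySem.Str.slice a (some 0) (some (m : Int))) := by
  have hget : PySem.Str.pyGet? a (m : Int) = a.toList[m]? := by
    rw [PySem.Str.pyGet?_natCast]
  have hstem : (PySem.Str.slice a (some 0) (some (m : Int))).toList = a.toList.take m :=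
    pv_slice_toList a m
  have hlen : (PySem.Str.slice a (some 0) (some (m : Int))).toList.length = m := by
    rw [hstem, List.length_take]; omega
  have hidx : a.toList[(PySem.Str.slice a (some 0) (some (m : Int))).toList.length]?
      = a.toList[m]? := by rw [hlen]
  constructor
  · rintro h
    rw [Bool.and_eq_true] at h
    obtain ⟨h1, h2⟩ := h
    refine ⟨(pv_contains_iff _).mp h2, ?_, ?_⟩
    · rw [hstem]; exact List.take_prefix m _
    · rw [hget] at h1
      cases ho : a.toList[m]? with
      | none => rw [ho] at h1; simp [Option.any] at h1
      | some c =>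
        rw [ho] at h1
        simp only [Option.any, Bool.or_eq_true, beq_iff_eq] at h1
        rw [hidx, ho]
        rcases h1 with ((rfl | rfl) | rfl)
        · exact Or.inr (Or.inl rfl)
        · exact Or.inr (Or.inr (Or.inl rfl))
        · exact Or.inr (Or.inr (Or.inr rfl))
  · rintro ⟨hmem, hpre, hcase⟩
    rw [Bool.and_eq_true]
    refine ⟨?_, (pv_contains_iff _).mpr hmem⟩
    rw [hget]
    rcases hcase with h | h | h | h
    · rw [hlen] at h; omega
    all_goals
      rw [hidx] at h; rw [h]; simp [Option.any]

-- a scan over cuts none of which tests true returns a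
lemma pv_scan_none (a : String) (ks : List Int)
    (h : ∀ k ∈ ks, (((PySem.Str.pyGet? a k).any fun c => c == '-' || c == 'l' || c == 'o')
        && PySem.Set.contains pvPSet (PySem.Str.slice a (some 0) (some k))) = false) :
    pvBScan a ks = a := by
  induction ks with
  | nil => rfl
  | cons k ks ih =>
    rw [pvBScan, h k List.mem_cons_self]
    exact ih (fun k' hk' => h k' (List.mem_cons_of_mem _ hk'))

-- a scan whose test holds exactly at k0 ∈ ks returns the stem at k0
lemma pv_scan_unique (a : String) (k0 : Int) (ks : List Int) (hk0 : k0 ∈ ks)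
    (h : ∀ k ∈ ks, ((((PySem.Str.pyGet? a k).any fun c => c == '-' || c == 'l' || c == 'o')
        && PySem.Set.contains pvPSet (PySem.Str.slice a (some 0) (some k))) = true) ↔ k = k0) :
    pvBScan a ks = PySem.Str.slice a (some 0) (some k0) := by
  induction ks with
  | nil => cases hk0
  | cons k ks ih =>
    rw [pvBScan]
    by_cases ht : (((PySem.Str.pyGet? a k).any fun c => c == '-' || c == 'l' || c == 'o')
        && PySem.Set.contains pvPSet (PySem.Str.slice a (some 0) (some k))) = true
    · rw [if_pos ht]
      obtain rfl := (h k List.mem_cons_self).mp ht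
      rfl
    · rw [if_neg ht]
      have hk0' : k0 ∈ ks := by
        rcases List.mem_cons.mp hk0 with rfl | hmem
        · exact absurd ((h k0 List.mem_cons_self).mpr rfl) ht
        · exact hmem
      exact ih hk0' (fun k' hk' => h k' (List.mem_cons_of_mem _ hk'))

-- first match over the prefix list (characterisation of A)
def pvFM (a : String) : String :=
  match pvPrefixes.find? (fun p => pvATest a p) with
  | some p => p
  | none => a

lemma pvALoop_eq_fm (a : String) : pvALoop a pvPrefixes = pvFM a := by
  rw [pvFM]
  induction pvPrefixes with
  | nil => rfl
  | cons p ps ih =>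
    rw [pvALoop_cons, List.find?]
    by_cases h : pvATest a p <;> simp [h, ih]

theorem pv_main (a : String) : canonicalize_area_py a = canonicalize_area_py_alt a := by
  have hA : canonicalize_area_py a = pvFM a := pvALoop_eq_fm a
  rw [hA, canonicalize_area_py_alt, pvFM]
  cases hf : pvPrefixes.find? (fun p => pvATest a p) with
  | none =>
    rw [List.find?_eq_none] at hf
    have hca : PySem.Set.contains pvPSet a = false := by
      by_contra hc
      have hmem : a ∈ pvPrefixes := (pv_contains_iff a).mp (Bool.of_not_eq_false hc)
      exact hf a hmem ((pvATest_iff a a).mpr (pv_match_self a))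
    rw [hca, if_neg (by simp)]
    refine (pv_scan_none a _ ?_).symm
    intro k hk
    rw [PySem.List.mem_pyRange_one] at hk
    obtain ⟨hk2, hk6⟩ := hk
    obtain ⟨m, rfl⟩ : ∃ m : Nat, k = (m : Int) := ⟨k.toNat, by omega⟩
    have hmlt : m < a.toList.length := by
      have := lt_min_iff.mp hk6
      have h1 : (m : Int) < PySem.Str.len a := this.1
      rw [PySem.Str.len_eq] at h1
      exact_mod_cast h1
    by_contra hc
    have := (pv_test_iff a m hmlt).mp (Bool.of_not_eq_false hc)
    exact hf _ this.1 ((pvATest_iff a _).mpr this.2)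
  | some p =>
    have hmem : p ∈ pvPrefixes := List.mem_of_find?_eq_some hf
    have hmatch : pvMatch a p := (pvATest_iff a p).mp (List.find?_some hf)
    by_cases hlen : a.toList.length = p.toList.length
    · -- exact match: p = a
      have hpa : p = a :=
        String.toList_inj.mp (hmatch.1.eq_of_length hlen.symm)
      subst hpa
      rw [if_pos ((pv_contains_iff p).mpr hmem)]
    · -- strict match at cut m = |p|
      have hlt : p.toList.length < a.toList.length :=
        lt_of_le_of_ne (pv_match_len a p hmatch) (fun h => hlen h.symm)
      set m := p.toList.length with hm
      have hstem : PySem.Str.slice a (some 0) (some (m : Int)) = p := by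
        rw [← String.toList_inj, pv_slice_toList]
        obtain ⟨t, ht⟩ := hmatch.1
        rw [← ht, List.take_left']
        rfl
      have hca : PySem.Set.contains pvPSet a = false := by
        by_contra hc
        have hamem : a ∈ pvPrefixes := (pv_contains_iff a).mp (Bool.of_not_eq_false hc)
        have := pv_unique a p hmem a hamem hmatch (pv_match_self a)
        exact hlen (congrArg (fun s => s.toList.length) this.symm)
      rw [hca, if_neg (by simp)]
      have hbounds := pv_lens p hmem
      have hmem0 : (m : Int) ∈ PySem.List.pyRange 2 (min (PySem.Str.len a) 6) 1 := by
        rw [PySem.List.mem_pyRange_one, PySem.Str.len_eq]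
        constructor
        · exact_mod_cast hbounds.1
        · rw [lt_min_iff]
          constructor
          · exact_mod_cast hlt
          · have : m ≤ 5 := hbounds.2
            omega
      rw [(pv_scan_unique a (m : Int) _ hmem0 ?_ : pvBScan a _ = _), hstem]
      intro k hk
      rw [PySem.List.mem_pyRange_one] at hk
      obtain ⟨hk2, hk6⟩ := hk
      obtain ⟨m', rfl⟩ : ∃ m' : Nat, k = (m' : Int) := ⟨k.toNat, by omega⟩
      have hm'lt : m' < a.toList.length := by
        have := lt_min_iff.mp hk6
        have h1 : (m' : Int) < PySem.Str.len a := this.1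
        rw [PySem.Str.len_eq] at h1
        exact_mod_cast h1
      constructor
      · intro ht
        obtain ⟨hmem', hmatch'⟩ := (pv_test_iff a m' hm'lt).mp ht
        have := pv_unique a _ hmem' p hmem hmatch' hmatch
        have hlenq : (PySem.Str.slice a (some 0) (some (m' : Int))).toList.length = m' := by
          rw [pv_slice_toList, List.length_take]; omega
        rw [this] at hlenq
        exact_mod_cast hlenq.symm
      · rintro hkk
        obtain rfl : m' = m := by exact_mod_cast hkk
        refine (pv_test_iff a m hm'lt).mpr ?_
        rw [hstem]
        exact ⟨hmem, hmatch⟩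

-- ===== VERDICT (by name: the statement is the Claim_ definition above) =====
theorem canonicalize_area_py_spec : Claim_equal_canonicalize_area_py := by
  intro a _
  exact pv_main a
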